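-- pv_equiv track=rewrite | github.com/danieleschmidt/Quantum-Annealed-Hyper-Search | quantum_hyper_search/utils/enterprise_security.py | _sanitize_string_value
-- ===== SOURCE A (Python) =====
-- def _sanitize_string_value(value: str) -> str:
--     """Sanitize string value."""
--     # Remove potentially dangerous characters/patterns
--     dangerous_chars = ['<', '>', '&', '"', "'", ';', '|', '&', '$']
--     sanitized = value
--
--     for char in dangerous_chars:
--         sanitized = sanitized.replace(char, '')
--
--     # Limit length
--     if len(sanitized) > 1000:  # Arbitrary limit
--         sanitized = sanitized[:1000]
--
--     return sanitized
-- ===== SOURCE B (Python) =====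
-- _DANGEROUS = frozenset('<>&"\';|$')
--
-- def _sanitize_string_value(value: str) -> str:
--     """Sanitize string value: one pass keeping safe chars, then cap length."""
--     return ''.join(ch for ch in value if ch not in _DANGEROUS)[:1000]
-- ===== Notes on version B (the rewrite author's own statement) =====
-- stated objective: simpler
-- what changed: Replaces A's nine successive full-string .replace passes (plus a conditional length check) by one single pass over the string keeping characters not in a frozenset of dangerous characters, followed by an unconditional [:1000] slice.
import Mathlib
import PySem

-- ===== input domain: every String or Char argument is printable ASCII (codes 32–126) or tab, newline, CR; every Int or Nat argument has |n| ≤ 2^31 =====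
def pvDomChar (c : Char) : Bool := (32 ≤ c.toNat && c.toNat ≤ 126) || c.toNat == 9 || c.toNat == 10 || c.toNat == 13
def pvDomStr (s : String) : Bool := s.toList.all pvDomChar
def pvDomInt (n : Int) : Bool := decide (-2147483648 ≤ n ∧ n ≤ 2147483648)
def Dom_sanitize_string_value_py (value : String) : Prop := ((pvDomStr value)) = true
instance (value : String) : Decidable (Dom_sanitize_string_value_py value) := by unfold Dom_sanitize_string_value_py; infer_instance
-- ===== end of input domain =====

-- B replaces A's nine successive full-string .replace passes by one filtering pass with a
-- frozenset membership test, then an unconditional [:1000] slice (simpler, single traversal).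

-- ===== PORT A =====
-- nine one-character strings, in A's order (including the duplicate '&')
def pvDangerousChars : List String := ["<", ">", "&", "\"", "'", ";", "|", "&", "$"]

def sanitize_string_value_py (value : String) : String :=
  let sanitized := pvDangerousChars.foldl (fun s c => PySem.Str.replace s c "") value
  if PySem.Str.len sanitized > 1000 then
    String.ofList (PySem.List.slice sanitized.toList none (some 1000))
  else sanitized

-- ===== PORT B =====
def pvDangerousSet : PySem.Set Char := PySem.Set.ofList ['<', '>', '&', '"', '\'', ';', '|', '$']

def sanitize_string_value_py_alt (value : String) : String :=
  String.ofList
    (PySem.List.slice (value.toList.filter (fun ch => !(pvDangerousSet.contains ch))) none (some 1000))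

-- ===== PRECONDITION & SPEC =====
def Spec_sanitize_string_value_py (value : String) (out : String) : Prop := out = sanitize_string_value_py_alt value
instance (value : String) (out : String) : Decidable (Spec_sanitize_string_value_py value out) := by unfold Spec_sanitize_string_value_py; infer_instance

-- ===== CLAIM (what is proved, stated in full; the proofs are below) =====
def Claim_equal_sanitize_string_value_py : Prop := ∀ (value : String), Dom_sanitize_string_value_py value → Spec_sanitize_string_value_py value (sanitize_string_value_py value)

-- ===== LEMMAS AND PROOFS =====

-- one .replace of a single char by "" is a filter
theorem pv_replace_go_filter (c : Char) (s : List Char) (fuel : Nat) (acc : List Char)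
    (h : s.length ≤ fuel) :
    PySem.Chars.replace.go [c] [] fuel s acc = acc.reverse ++ s.filter (fun ch => ch ≠ c) := by
  induction s generalizing fuel acc with
  | nil => cases fuel <;> simp [PySem.Chars.replace.go]
  | cons a t ih =>
      cases fuel with
      | zero => simp at h
      | succ fuel =>
          simp only [PySem.Chars.replace.go]
          by_cases hac : c = a
          · subst hac
            simp only [List.length_cons, List.length_nil, List.drop_succ_cons, List.drop_zero,
              List.reverse_nil, List.nil_append]
            rw [ih fuel acc (Nat.le_of_succ_le_succ h),
              if_pos (show ([c].isPrefixOf (c :: t)) = true by simp [List.isPrefixOf])]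
            simp
          · rw [if_neg (show ¬(([c].isPrefixOf (a :: t)) = true) by
                simp [List.isPrefixOf, hac])]
            rw [ih fuel (a :: acc) (by simpa using Nat.le_of_succ_le_succ h)]
            simp [Ne.symm hac]

theorem pv_replace_filter (s : String) (c : Char) :
    (PySem.Str.replace s (String.ofList [c]) "").toList = s.toList.filter (fun ch => ch ≠ c) := by
  rw [PySem.Str.toList_replace]
  rw [String.toList_ofList, show ("" : String).toList = [] from rfl]
  unfold PySem.Chars.replace
  simp only [List.isEmpty, Bool.false_eq_true, if_false]
  exact pv_replace_go_filter c s.toList s.toList.length [] (le_refl _)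

theorem pv_fold_filter (value : String) :
    (pvDangerousChars.foldl (fun s c => PySem.Str.replace s c "") value).toList
      = value.toList.filter (fun ch => !(pvDangerousSet.contains ch)) := by
  have hlit : ∀ (c : Char) (s : String),
      PySem.Str.replace s (String.ofList [c]) "" = String.ofList (s.toList.filter (fun ch => ch ≠ c)) := by
    intro c s
    apply String.toList_injective
    rw [pv_replace_filter, String.toList_ofList]
  show (List.foldl (fun s c => PySem.Str.replace s c "") value
      ["<", ">", "&", "\"", "'", ";", "|", "&", "$"]).toList = _
  simp only [List.foldl]
  rw [show ("<" : String) = String.ofList ['<'] from rfl]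
  rw [show (">" : String) = String.ofList ['>'] from rfl]
  rw [show ("&" : String) = String.ofList ['&'] from rfl]
  rw [show ("\"" : String) = String.ofList ['"'] from rfl]
  rw [show ("'" : String) = String.ofList ['\''] from rfl]
  rw [show (";" : String) = String.ofList [';'] from rfl]
  rw [show ("|" : String) = String.ofList ['|'] from rfl]
  rw [show ("$" : String) = String.ofList ['$'] from rfl]
  simp only [hlit, String.toList_ofList, List.filter_filter]
  apply List.filter_congr
  intro ch _
  show _ = !(pvDangerousSet.contains ch)
  by_cases h : ch ∈ (['<', '>', '&', '"', '\'', ';', '|', '$'] : List Char)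
  · fin_cases h <;> rfl
  · simp only [List.mem_cons, List.not_mem_nil, or_false, not_or] at h
    obtain ⟨h1, h2, h3, h4, h5, h6, h7, h8⟩ := h
    simp [pvDangerousSet, PySem.Set.contains, PySem.Set.ofList, PySem.Set.add,
      h1, h2, h3, h4, h5, h6, h7, h8]

-- ===== VERDICT (by name: the statement is the Claim_ definition above) =====
theorem sanitize_string_value_py_spec : Claim_equal_sanitize_string_value_py := by
  intro value _
  show sanitize_string_value_py value = sanitize_string_value_py_alt value
  unfold sanitize_string_value_py sanitize_string_value_py_alt
  have hf := pv_fold_filter value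
  set L := value.toList.filter (fun ch => !(pvDangerousSet.contains ch)) with hL
  set S := pvDangerousChars.foldl (fun s c => PySem.Str.replace s c "") value with hS
  simp only []
  by_cases h : PySem.Str.len S > 1000
  · rw [if_pos h]
    rw [hf]
  · rw [if_neg h]
    have hlen : L.length ≤ 1000 := by
      have he : PySem.Str.len S = S.toList.length := PySem.Str.len_eq S
      rw [hf] at he
      omega
    apply String.toList_injective
    rw [hf, String.toList_ofList, PySem.List.slice_to _ (by norm_num : (0:Int) ≤ 1000)]
    exact (List.take_of_length_le (by simpa using hlen)).symm
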